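-- pv_equiv track=rewrite | github.com/EshwarAnad/codewars-1 | python katas/Dubstep(6kyu)/solution.py | song_decoder
-- ===== SOURCE A (Python) =====
-- def song_decoder(song):
--     song="WUB"+song+"WUB"
--     j=""
--     s=""
--     for i in song:
--         j+=i
--         if j=="WUB":
--             j=""
--         elif j.find("WUB") != -1:
--             s+=(j[:j.find("WUB")]+" ")
--             j=""
--     return s.strip()
-- ===== SOURCE B (Python) =====
-- def song_decoder(song):
--     return " ".join(w for w in song.split("WUB") if w).strip()
-- ===== Notes on version B (the rewrite author's own statement) =====
-- stated objective: faster
-- what changed: Replaces A's character-by-character scan (sentinel markers appended, a growing buffer re-searched with find at every character) by one pass of str.split on the marker, joining the non-empty pieces with a single space and stripping.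
import Mathlib
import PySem

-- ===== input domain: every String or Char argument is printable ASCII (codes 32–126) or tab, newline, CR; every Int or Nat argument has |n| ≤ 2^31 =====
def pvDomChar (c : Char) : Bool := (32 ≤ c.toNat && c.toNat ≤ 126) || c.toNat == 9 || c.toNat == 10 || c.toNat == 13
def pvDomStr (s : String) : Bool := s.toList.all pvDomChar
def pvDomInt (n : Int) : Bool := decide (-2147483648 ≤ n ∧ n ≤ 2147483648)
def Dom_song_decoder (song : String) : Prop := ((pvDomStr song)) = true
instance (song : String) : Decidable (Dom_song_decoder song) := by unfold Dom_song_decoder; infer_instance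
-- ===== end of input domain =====

-- B replaces A's character-by-character buffer scan (sentinel WUBs appended, substring search
-- inside the loop) by one split on "WUB", joining the non-empty pieces with a space and stripping.


-- ===== PORT A =====
def wubL : List Char := ['W', 'U', 'B']

-- the loop body of A: j += i; if j == "WUB": j = "" elif j.find("WUB") != -1: s += j[:find] + " "; j = ""
def stepA (js : List Char × List Char) (i : Char) : List Char × List Char :=
  let j := js.1 ++ [i]
  if j = wubL then ([], js.2)
  else if PySem.Chars.find j wubL ≠ -1 then
    ([], js.2 ++ PySem.List.slice j none (some (PySem.Chars.find j wubL)) ++ [' '])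
  else (j, js.2)

def song_decoder (song : String) : String :=
  let song2 := wubL ++ song.toList ++ wubL
  String.ofList (PySem.Chars.strip (song2.foldl stepA ([], [])).2)

-- ===== PORT B =====
def song_decoder_alt (song : String) : String :=
  String.ofList (PySem.Chars.strip (PySem.Chars.join [' ']
    ((PySem.Chars.splitOn song.toList wubL).filter (fun w => !w.isEmpty))))

-- ===== PRECONDITION & SPEC =====
def Spec_song_decoder (song : String) (out : String) : Prop := out = song_decoder_alt song
instance (song : String) (out : String) : Decidable (Spec_song_decoder song out) := by unfold Spec_song_decoder; infer_instance

-- ===== CLAIM (what is proved, stated in full; the proofs are below) =====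
def Claim_equal_song_decoder : Prop := ∀ (song : String), Dom_song_decoder song → Spec_song_decoder song (song_decoder song)

-- ===== LEMMAS AND PROOFS =====

-- A's emitted text for the middle part t (before the final strip)
def emitA (t : List Char) : List Char :=
  (((PySem.Chars.splitOn t wubL).filter (fun w => !w.isEmpty)).map (· ++ [' '])).flatten

theorem notinfix_snoc {q : List Char} {c : Char} (hc : c ≠ 'B') (h : ¬ wubL <:+: q) :
    ¬ wubL <:+: (q ++ [c]) := by
  rintro ⟨u, v, huv⟩
  rcases List.eq_nil_or_concat v with rfl | ⟨v', a, rfl⟩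
  · have h2 := congrArg List.reverse huv
    simp [wubL] at h2
    exact hc h2.1.symm
  · have h2 := congrArg List.reverse huv
    simp [List.reverse_append] at h2
    obtain ⟨-, h3⟩ := h2
    exact h ⟨u, v', by
      have := congrArg List.reverse h3
      simpa [List.reverse_append] using this⟩

theorem no_early {q : List Char} (h : ¬ wubL <:+: q) :
    ∀ i < q.length, ∀ t, ¬ wubL <+: (q.drop i ++ ('W' :: 'U' :: 'B' :: t)) := by
  intro i hi t hpre
  obtain ⟨r, hr⟩ := hpre
  have hd : q.drop i ≠ [] := by
    intro he
    have := congrArg List.length he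
    simp at this
    omega
  rcases hdq : q.drop i with _ | ⟨a, _ | ⟨b, _ | ⟨e, d4⟩⟩⟩
  · exact hd hdq
  · rw [hdq] at hr; simp [wubL] at hr
  · rw [hdq] at hr; simp [wubL] at hr
  · rw [hdq] at hr
    simp [wubL] at hr
    obtain ⟨ha, hb, he', -⟩ := hr
    obtain ⟨u, hu⟩ := List.drop_suffix i q
    exact h ⟨u, d4, by rw [← hu, hdq, ← ha, ← hb, ← he']; simp [wubL]⟩

theorem foldA_free : ∀ (t j s : List Char), ¬ wubL <:+: (j ++ t) →
    List.foldl stepA (j, s) t = (j ++ t, s) := by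
  intro t
  induction t with
  | nil => intro j s _; simp
  | cons c t' ih =>
    intro j s h
    have hmid : (j ++ [c]) <:+: (j ++ c :: t') := ⟨[], t', by simp⟩
    have hinf : ¬ wubL <:+: (j ++ [c]) := fun hin => h (hin.trans hmid)
    have hne : j ++ [c] ≠ wubL := fun he => hinf (he ▸ List.infix_refl _)
    have hf : PySem.Chars.find (j ++ [c]) wubL = -1 := (PySem.Chars.find_eq_neg_one_iff _ _).mpr hinf
    have hstep : stepA (j, s) c = (j ++ [c], s) := by
      simp [stepA, hne, hf]
    rw [List.foldl_cons, hstep, ih (j ++ [c]) s (by simpa using h)]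
    simp

theorem foldA_wub_nil (s t : List Char) :
    List.foldl stepA (([] : List Char), s) (wubL ++ t) = List.foldl stepA ([], s) t := by
  have e1 : stepA ([], s) 'W' = (['W'], s) := rfl
  have e2 : stepA (['W'], s) 'U' = (['W', 'U'], s) := rfl
  have e3 : stepA (['W', 'U'], s) 'B' = ([], s) := rfl
  show List.foldl stepA ([], s) ('W' :: 'U' :: 'B' :: t) = _
  rw [List.foldl_cons, e1, List.foldl_cons, e2, List.foldl_cons, e3]

theorem ne_wub_snoc {q : List Char} {c : Char} (hc : c ≠ 'B') : q ++ [c] ≠ wubL := by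
  intro he
  have h2 := congrArg List.reverse he
  simp [wubL] at h2
  exact hc h2.1

theorem foldA_wub_flush (q s t : List Char) (hq : q ≠ []) (h : ¬ wubL <:+: q) :
    List.foldl stepA (q, s) (wubL ++ t) = List.foldl stepA ([], s ++ q ++ [' ']) t := by
  have hW : ¬ wubL <:+: (q ++ ['W']) := notinfix_snoc (by decide) h
  have hWU : ¬ wubL <:+: (q ++ ['W'] ++ ['U']) := notinfix_snoc (by decide) hW
  have e1 : stepA (q, s) 'W' = (q ++ ['W'], s) := by
    simp [stepA, ne_wub_snoc (show ('W' : Char) ≠ 'B' by decide),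
      (PySem.Chars.find_eq_neg_one_iff _ _).mpr hW]
  have e2 : stepA (q ++ ['W'], s) 'U' = (q ++ ['W', 'U'], s) := by
    have hf2 : PySem.Chars.find (q ++ ['W', 'U']) wubL = -1 := by
      have := (PySem.Chars.find_eq_neg_one_iff (q ++ ['W'] ++ ['U']) wubL).mpr hWU
      simpa using this
    have hne2 : q ++ ['W', 'U'] ≠ wubL := by
      intro he
      have h2 := congrArg List.reverse he
      simp [wubL] at h2
    have hj : (q ++ ['W']) ++ ['U'] = q ++ ['W', 'U'] := by simp
    simp only [stepA, hj, hne2, if_false, hf2]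
    simp
  have hocc : wubL <+: (q ++ wubL).drop q.length := by
    rw [List.drop_left]
  have hinf3 : wubL <:+: (q ++ wubL) := ⟨q, [], by simp⟩
  have h0 : 0 ≤ PySem.Chars.find (q ++ wubL) wubL := (PySem.Chars.find_nonneg_iff _ _).mpr hinf3
  obtain ⟨hsp1, hsp2⟩ := PySem.Chars.find_spec h0
  have hk : (PySem.Chars.find (q ++ wubL) wubL).toNat = q.length := by
    by_contra hne
    rcases Nat.lt_or_ge (PySem.Chars.find (q ++ wubL) wubL).toNat q.length with hlt | hge
    · rw [List.drop_append_of_le_length (le_of_lt hlt)] at hsp1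
      exact no_early h _ hlt [] (by simpa [wubL] using hsp1)
    · exact hsp2 q.length (by omega) hocc
  have hfind : PySem.Chars.find (q ++ wubL) wubL = (q.length : Int) := by omega
  have hne3 : q ++ wubL ≠ wubL := by
    intro he
    have := congrArg List.length he
    simp [wubL] at this
    exact hq this
  have e3 : stepA (q ++ ['W', 'U'], s) 'B' = ([], s ++ q ++ [' ']) := by
    have hqw : (q ++ ['W', 'U']) ++ ['B'] = q ++ wubL := by simp [wubL]
    have hslice : PySem.List.slice (q ++ wubL) none (some (q.length : Int)) = q := by
      rw [PySem.List.slice_to _ (by positivity)]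
      simp
    have hfne : PySem.Chars.find (q ++ wubL) wubL ≠ -1 := by rw [hfind]; omega
    simp only [stepA, hqw]
    rw [if_neg hne3, if_pos hfne, hfind, hslice]
  show List.foldl stepA (q, s) ('W' :: 'U' :: 'B' :: t) = _
  rw [List.foldl_cons, e1, List.foldl_cons, e2, List.foldl_cons, e3]

theorem go_zero (sep l cur : List Char) (acc : List (List Char)) :
    PySem.Chars.splitOn.go sep 0 l cur acc = ((cur.reverse ++ l) :: acc).reverse := by
  rw [PySem.Chars.splitOn.go]

theorem go_succ_nil (sep cur : List Char) (f : Nat) (acc : List (List Char)) :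
    PySem.Chars.splitOn.go sep (f+1) [] cur acc = (cur.reverse :: acc).reverse := by
  rw [PySem.Chars.splitOn.go]
  omega

theorem go_succ_cons (sep : List Char) (f : Nat) (c : Char) (rest cur : List Char) (acc : List (List Char)) :
    PySem.Chars.splitOn.go sep (f+1) (c :: rest) cur acc =
      (if sep.isPrefixOf (c :: rest) then PySem.Chars.splitOn.go sep f ((c :: rest).drop sep.length) [] (cur.reverse :: acc)
       else PySem.Chars.splitOn.go sep f rest (c :: cur) acc) := by
  rw [PySem.Chars.splitOn.go]

theorem go_acc (sep : List Char) : ∀ (fuel : Nat) (l cur : List Char) (acc : List (List Char)),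
    PySem.Chars.splitOn.go sep fuel l cur acc = acc.reverse ++ PySem.Chars.splitOn.go sep fuel l cur [] := by
  intro fuel
  induction fuel with
  | zero => intro l cur acc; rw [go_zero, go_zero]; simp
  | succ f ih =>
    intro l cur acc
    cases l with
    | nil => rw [go_succ_nil, go_succ_nil]; simp
    | cons c rest =>
      rw [go_succ_cons, go_succ_cons]
      split
      · rw [ih _ _ (cur.reverse :: acc), ih _ _ [cur.reverse]]
        simp
      · rw [ih _ _ acc]

theorem go_fuel (sep : List Char) (hsep : sep ≠ []) : ∀ (n : Nat) (l : List Char), l.length ≤ n →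
    ∀ (fuel₁ fuel₂ : Nat) (cur : List Char) (acc : List (List Char)),
    l.length < fuel₁ → l.length < fuel₂ →
    PySem.Chars.splitOn.go sep fuel₁ l cur acc = PySem.Chars.splitOn.go sep fuel₂ l cur acc := by
  intro n
  induction n using Nat.strong_induction_on with
  | _ n ihn =>
    intro l hl fuel₁ fuel₂ cur acc h1 h2
    have hs1 : 1 ≤ sep.length := by
      cases sep with
      | nil => exact absurd rfl hsep
      | cons a b => simp
    cases l with
    | nil =>
      obtain ⟨f1, rfl⟩ : ∃ f, fuel₁ = f + 1 := ⟨fuel₁ - 1, by omega⟩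
      obtain ⟨f2, rfl⟩ : ∃ f, fuel₂ = f + 1 := ⟨fuel₂ - 1, by omega⟩
      rw [go_succ_nil, go_succ_nil]
    | cons c rest =>
      obtain ⟨f1, rfl⟩ : ∃ f, fuel₁ = f + 1 := ⟨fuel₁ - 1, by omega⟩
      obtain ⟨f2, rfl⟩ : ∃ f, fuel₂ = f + 1 := ⟨fuel₂ - 1, by omega⟩
      rw [go_succ_cons, go_succ_cons]
      have hlen : (c :: rest).length = rest.length + 1 := by simp
      split
      · apply ihn (n - 1) (by omega)
        · simp; omega
        · simp; omega
        · simp; omega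
      · apply ihn (n - 1) (by omega)
        · simp at hl ⊢; omega
        · omega
        · omega

theorem go_free (sep : List Char) :
    ∀ (l : List Char), (∀ i, ¬ sep <+: l.drop i) →
    ∀ (fuel : Nat) (cur : List Char) (acc : List (List Char)), l.length < fuel →
    PySem.Chars.splitOn.go sep fuel l cur acc = acc.reverse ++ [cur.reverse ++ l] := by
  intro l
  induction l with
  | nil =>
    intro _ fuel cur acc hf
    obtain ⟨f, rfl⟩ : ∃ f, fuel = f + 1 := ⟨fuel - 1, by omega⟩
    rw [go_succ_nil]
    simp
  | cons c rest ih =>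
    intro H fuel cur acc hf
    obtain ⟨f, rfl⟩ : ∃ f, fuel = f + 1 := ⟨fuel - 1, by omega⟩
    rw [go_succ_cons]
    have hnp : sep.isPrefixOf (c :: rest) = false := by
      rw [Bool.eq_false_iff]
      intro hp
      exact H 0 (by simpa using List.isPrefixOf_iff_prefix.mp hp)
    rw [hnp]
    simp only [Bool.false_eq_true, if_false]
    rw [ih (fun i => by simpa using H (i + 1)) f (c :: cur) acc (by simp at hf ⊢; omega)]
    simp

theorem not_prefix_drop {t : List Char} (h : ¬ wubL <:+: t) (i : Nat) : ¬ wubL <+: t.drop i := by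
  rintro ⟨r, hr⟩
  exact h ⟨t.take i, r, by rw [List.append_assoc, hr, List.take_append_drop]⟩

theorem splitOn_free (t : List Char) (h : ¬ wubL <:+: t) :
    PySem.Chars.splitOn t wubL = [t] := by
  unfold PySem.Chars.splitOn
  rw [go_free wubL t (not_prefix_drop h) _ [] [] (by omega)]
  simp

theorem splitOn_chunk (p t : List Char) (h : ¬ wubL <:+: p) :
    PySem.Chars.splitOn (p ++ wubL ++ t) wubL = p :: PySem.Chars.splitOn t wubL := by
  have aux : ∀ (p' : List Char), (∀ i < p'.length, ¬ wubL <+: (p'.drop i ++ (wubL ++ t))) →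
      ∀ (fuel : Nat) (cur : List Char), (p' ++ wubL ++ t).length < fuel →
      PySem.Chars.splitOn.go wubL fuel (p' ++ wubL ++ t) cur [] =
        (cur.reverse ++ p') :: PySem.Chars.splitOn t wubL := by
    intro p'
    induction p' with
    | nil =>
      intro _ fuel cur hf
      obtain ⟨f, rfl⟩ : ∃ f, fuel = f + 1 := ⟨fuel - 1, by omega⟩
      have hshow : ([] : List Char) ++ wubL ++ t = 'W' :: 'U' :: 'B' :: t := by simp [wubL]
      rw [hshow, go_succ_cons]
      have hp : wubL.isPrefixOf ('W' :: 'U' :: 'B' :: t) = true :=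
        List.isPrefixOf_iff_prefix.mpr ⟨t, by simp [wubL]⟩
      rw [hp]
      simp only [if_true]
      have hdrop : ('W' :: 'U' :: 'B' :: t).drop wubL.length = t := by simp [wubL]
      rw [hdrop, go_acc]
      rw [go_fuel wubL (by decide) t.length t le_rfl f (t.length + 1) [] [] (by simp [wubL] at hf; omega) (by omega)]
      unfold PySem.Chars.splitOn
      simp
    | cons c p'' ih =>
      intro H fuel cur hf
      obtain ⟨f, rfl⟩ : ∃ f, fuel = f + 1 := ⟨fuel - 1, by omega⟩
      have hshow : (c :: p'') ++ wubL ++ t = c :: (p'' ++ wubL ++ t) := by simp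
      rw [hshow, go_succ_cons]
      have hnp : wubL.isPrefixOf (c :: (p'' ++ wubL ++ t)) = false := by
        rw [Bool.eq_false_iff]
        intro hp
        have := H 0 (by simp)
        apply this
        have h2 := List.isPrefixOf_iff_prefix.mp hp
        simpa [wubL] using h2
      rw [hnp]
      simp only [Bool.false_eq_true, if_false]
      rw [ih (fun i hi => by simpa using H (i + 1) (by simp; omega)) f (c :: cur) (by simp at hf ⊢; omega)]
      simp
  unfold PySem.Chars.splitOn
  rw [aux p (fun i hi => by simpa [wubL] using no_early h i hi t) _ [] (by omega)]
  simp
  rw [PySem.Chars.splitOn]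

theorem foldA_main : ∀ (n : Nat) (t : List Char), t.length ≤ n → ∀ (s : List Char),
    List.foldl stepA (([] : List Char), s) (t ++ wubL) = ([], s ++ emitA t) := by
  intro n
  induction n using Nat.strong_induction_on with
  | _ n ihn =>
    intro t hn s
    by_cases hin : wubL <:+: t
    · -- t = p ++ WUB ++ t' at the first occurrence
      have h0 : 0 ≤ PySem.Chars.find t wubL := (PySem.Chars.find_nonneg_iff _ _).mpr hin
      obtain ⟨hsp1, hsp2⟩ := PySem.Chars.find_spec h0
      set k := (PySem.Chars.find t wubL).toNat with hkdef
      have hkle : k ≤ t.length := by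
        have := PySem.Chars.find_le_length t wubL
        omega
      obtain ⟨r, hr⟩ := hsp1
      have hrt : r = t.drop (k + 3) := by
        have := congrArg (List.drop 3) hr
        simp [wubL, List.drop_drop] at this
        rw [this]
      have ht : t = t.take k ++ wubL ++ t.drop (k + 3) := by
        conv_lhs => rw [← List.take_append_drop k t]
        rw [← hr, hrt]
        simp
      have hp : ¬ wubL <:+: t.take k := by
        rintro ⟨u, v, huv⟩
        have hul : u.length + 3 + v.length = k := by
          have := congrArg List.length huv
          simp [wubL] at this
          omega
        apply hsp2 u.length (by omega)
        have hdt : t.drop u.length = (wubL ++ v) ++ t.drop k := by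
          conv_lhs => rw [← List.take_append_drop k t]
          rw [List.drop_append_of_le_length (by simp [List.length_take]; omega), ← huv]
          rw [List.append_assoc, List.drop_left]
        rw [hdt]
        exact ⟨v ++ t.drop k, by simp⟩
      have hlen : t.length = k + 3 + (t.drop (k + 3)).length := by
        have h3 := congrArg List.length hr
        simp [wubL] at h3
        simp [List.length_drop]
        omega
      rw [ht]
      have hassoc : t.take k ++ wubL ++ t.drop (k + 3) ++ wubL
          = t.take k ++ (wubL ++ (t.drop (k + 3) ++ wubL)) := by simp
      rw [hassoc, List.foldl_append]
      rw [foldA_free (t.take k) [] s (by simpa using hp)]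
      rw [List.nil_append]
      rw [emitA, splitOn_chunk _ _ hp]
      by_cases hpe : t.take k = []
      · rw [hpe, foldA_wub_nil]
        rw [ihn (n - 1) (by omega) (t.drop (k + 3)) (by omega) s]
        simp [emitA]
      · rw [foldA_wub_flush _ _ _ hpe hp]
        rw [ihn (n - 1) (by omega) (t.drop (k + 3)) (by omega)]
        rw [List.filter_cons_of_pos (by simpa using hpe)]
        simp [emitA]
    · -- no WUB in t at all
      cases ht : t with
      | nil =>
        subst ht
        have h1 : ([] : List Char) ++ wubL = wubL ++ [] := by simp
        rw [h1, foldA_wub_nil]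
        have : emitA [] = [] := by decide
        simp [this]
      | cons c t0 =>
        rw [← ht]
        have hne : t ≠ [] := by rw [ht]; simp
        have h2 : t ++ wubL = t ++ (wubL ++ []) := by simp
        rw [h2, List.foldl_append, foldA_free t [] s (by simpa using hin)]
        rw [List.nil_append, foldA_wub_flush _ _ _ hne hin]
        rw [emitA, splitOn_free t hin]
        rw [List.filter_cons_of_pos (by simpa using hne)]
        simp

theorem flatten_vs_join (ws : List (List Char)) :
    (ws.map (· ++ [' '])).flatten =
      PySem.Chars.join [' '] ws ++ (if ws.isEmpty then [] else [' ']) := by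
  induction ws with
  | nil => simp [PySem.Chars.join_nil]
  | cons w ws ih =>
    cases ws with
    | nil => simp [PySem.Chars.join_singleton]
    | cons v vs =>
      rw [PySem.Chars.join_cons_cons]
      simp only [List.map_cons, List.flatten_cons] at ih ⊢
      rw [ih]
      simp

theorem strip_append_space (x : List Char) :
    PySem.Chars.strip (x ++ [' ']) = PySem.Chars.strip x := by
  unfold PySem.Chars.strip PySem.Chars.lstrip PySem.Chars.rstrip
  rw [List.dropWhile_append]
  split
  · rename_i h
    rw [List.isEmpty_iff] at h
    rw [h]
    have hs : PySem.Chars.isspace ' ' = true := by decide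
    simp [hs]
  · rw [List.reverse_append]
    have hs : PySem.Chars.isspace ' ' = true := by decide
    simp [hs]

-- ===== VERDICT (by name: the statement is the Claim_ definition above) =====
theorem song_decoder_spec : Claim_equal_song_decoder := by
  intro song _
  unfold Spec_song_decoder song_decoder song_decoder_alt
  show String.ofList (PySem.Chars.strip (List.foldl stepA ([], []) (wubL ++ song.toList ++ wubL)).2) = _
  have h1 : wubL ++ song.toList ++ wubL = wubL ++ (song.toList ++ wubL) := by simp
  rw [h1, foldA_wub_nil, foldA_main song.toList.length song.toList le_rfl]
  show String.ofList (PySem.Chars.strip ([] ++ emitA song.toList)) = _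
  rw [List.nil_append, emitA, flatten_vs_join]
  split
  · simp_all
  · rw [strip_append_space]
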